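-- pv_equiv track=rewrite | github.com/Akumar201/autoware_docker | scripts/plot_ros_data_movement.py | topic_to_sensor_data_category
-- ===== SOURCE A (Python) =====
-- def topic_to_sensor_data_category(topic: str):
--     """
--     Map topic path to sensor-data type based on topic names.
--
--     More specific payload names take precedence over namespace-only matches so
--     `/occupancy_grid_map/virtual_scan/pointcloud` is treated as Point Cloud
--     rather than Occupancy Grid Map.
--     """
--     topic = topic.strip("/")
--     if not topic:
--         return None
--
--     parts = [p.lower() for p in topic.split("/") if p]
--     last = parts[-1] if parts else ""
--
--     if any("imu" in p for p in parts):
--         return "IMU"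
--     if "laserscan" in last:
--         return "Laser Scan"
--     if "pointcloud" in last or last.startswith("points"):
--         return "Point Cloud"
--     if "occupancy_grid_map" in parts:
--         return "Occupancy Grid Map"
--     if any("laserscan" in p for p in parts):
--         return "Laser Scan"
--     if any("pointcloud" in p or p.startswith("points") for p in parts):
--         return "Point Cloud"
--     return None
-- ===== SOURCE B (Python) =====
-- _CATS = ("IMU", "Laser Scan", "Point Cloud", "Occupancy Grid Map", "Laser Scan", "Point Cloud")
--
--
-- def _rank(p, is_last):
--     """Priority rank of a single path component (0 = strongest, 6 = no match)."""
--     cands = [6]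
--     if "imu" in p:
--         cands.append(0)
--     if "laserscan" in p:
--         cands.append(1 if is_last else 4)
--     if "pointcloud" in p or p.startswith("points"):
--         cands.append(2 if is_last else 5)
--     if p == "occupancy_grid_map":
--         cands.append(3)
--     return min(cands)
--
--
-- def topic_to_sensor_data_category(topic: str):
--     # Rank-minimisation: each part gets a numeric priority, the best (smallest)
--     # rank over all parts selects the category from a table.
--     topic = topic.strip("/")
--     if not topic:
--         return None
--     parts = [p.lower() for p in topic.split("/") if p]
--     if not parts:
--         return None
--     ranks = [_rank(p, False) for p in parts[:-1]]
--     ranks.append(_rank(parts[-1], True))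
--     best = min(ranks)
--     return _CATS[best] if best < 6 else None
-- ===== Notes on version B (the rewrite author's own statement) =====
-- stated objective: alternative
-- what changed: B replaces A's ordered chain of six short-circuiting scans with rank minimisation: each path component is mapped to a numeric priority rank (position-sensitive for the last component), the global minimum rank is taken, and the category is read from a lookup table.
import Mathlib
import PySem

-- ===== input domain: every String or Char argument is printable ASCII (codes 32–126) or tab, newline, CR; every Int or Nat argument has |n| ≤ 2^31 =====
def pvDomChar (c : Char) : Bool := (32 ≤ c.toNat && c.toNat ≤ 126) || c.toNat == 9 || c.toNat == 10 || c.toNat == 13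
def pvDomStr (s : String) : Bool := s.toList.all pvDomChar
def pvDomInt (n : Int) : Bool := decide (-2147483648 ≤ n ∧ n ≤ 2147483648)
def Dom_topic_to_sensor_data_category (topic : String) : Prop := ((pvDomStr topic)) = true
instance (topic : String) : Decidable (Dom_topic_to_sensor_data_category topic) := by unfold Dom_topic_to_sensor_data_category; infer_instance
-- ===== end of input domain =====

-- B replaces A's ordered chain of six scans with per-part numeric priority ranks,
-- a global minimum, and a category lookup table (alternative algorithm, same cost).

-- ===== PORT A =====
-- Literal transliteration of A: ordered chain of short-circuit scans over `parts`.
def topic_to_sensor_data_category (topic : String) : Option String :=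
  let t := PySem.Str.stripChars topic "/"
  if t = "" then none
  else
    let parts : List String := (((PySem.Str.split? t "/").getD []).filter (fun p => p ≠ "")).map PySem.Str.lower
    let last := parts.getLastD ""
    if parts.any (fun p => PySem.Str.isIn "imu" p) then some "IMU"
    else if PySem.Str.isIn "laserscan" last then some "Laser Scan"
    else if PySem.Str.isIn "pointcloud" last || PySem.Str.startswith last "points" then some "Point Cloud"
    else if parts.contains "occupancy_grid_map" then some "Occupancy Grid Map"
    else if parts.any (fun p => PySem.Str.isIn "laserscan" p) then some "Laser Scan"
    else if parts.any (fun p => PySem.Str.isIn "pointcloud" p || PySem.Str.startswith p "points") then some "Point Cloud"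
    else none

-- ===== PORT B =====
-- B helper: priority rank of one path component (0 strongest, 6 = no match).
def pvRankB (p : String) (isLast : Bool) : Nat :=
  let cands : List Nat :=
    [6] ++ (if PySem.Str.isIn "imu" p then [0] else [])
        ++ (if PySem.Str.isIn "laserscan" p then [if isLast then 1 else 4] else [])
        ++ (if PySem.Str.isIn "pointcloud" p || PySem.Str.startswith p "points" then [if isLast then 2 else 5] else [])
        ++ (if p == "occupancy_grid_map" then [3] else [])
  cands.foldl min 6

def pvCatsB : List String := ["IMU", "Laser Scan", "Point Cloud", "Occupancy Grid Map", "Laser Scan", "Point Cloud"]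

-- B: rank minimisation over the components, category read from the table.
def topic_to_sensor_data_category_alt (topic : String) : Option String :=
  let t := PySem.Str.stripChars topic "/"
  if t = "" then none
  else
    let parts : List String := (((PySem.Str.split? t "/").getD []).filter (fun p => p ≠ "")).map PySem.Str.lower
    if parts = [] then none
    else
      let ranks : List Nat := (parts.dropLast.map (fun p => pvRankB p false)) ++ [pvRankB (parts.getLastD "") true]
      let best := ranks.foldl min 6
      if best < 6 then some (pvCatsB.getD best "") else none

-- ===== PRECONDITION & SPEC =====
def Spec_topic_to_sensor_data_category (topic : String) (out : Option String) : Prop := out = topic_to_sensor_data_category_alt topic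
instance (topic : String) (out : Option String) : Decidable (Spec_topic_to_sensor_data_category topic out) := by unfold Spec_topic_to_sensor_data_category; infer_instance

-- ===== CLAIM (what is proved, stated in full; the proofs are below) =====
def Claim_equal_topic_to_sensor_data_category : Prop := ∀ (topic : String), Dom_topic_to_sensor_data_category topic → Spec_topic_to_sensor_data_category topic (topic_to_sensor_data_category topic)

-- ===== LEMMAS AND PROOFS =====

-- pvRankB in closed nested-if form (per-part, both positions)
theorem pvRankB_eq (p : String) (isLast : Bool) :
    pvRankB p isLast =
      if PySem.Str.isIn "imu" p then 0
      else if isLast then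
        (if PySem.Str.isIn "laserscan" p then 1
         else if PySem.Str.isIn "pointcloud" p || PySem.Str.startswith p "points" then 2
         else if p == "occupancy_grid_map" then 3 else 6)
      else
        (if p == "occupancy_grid_map" then 3
         else if PySem.Str.isIn "laserscan" p then 4
         else if PySem.Str.isIn "pointcloud" p || PySem.Str.startswith p "points" then 5 else 6) := by
  unfold pvRankB
  cases h1 : PySem.Str.isIn "imu" p <;>
  cases h2 : PySem.Str.isIn "laserscan" p <;>
  cases h3 : PySem.Str.isIn "pointcloud" p || PySem.Str.startswith p "points" <;>
  cases h4 : p == "occupancy_grid_map" <;>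
  cases isLast <;> simp

-- minimum rank over non-last components, in closed form
def pvMinQ (Q : List String) : Nat :=
  if Q.any (fun p => PySem.Str.isIn "imu" p) then 0
  else if Q.any (fun p => p == "occupancy_grid_map") then 3
  else if Q.any (fun p => PySem.Str.isIn "laserscan" p) then 4
  else if Q.any (fun p => PySem.Str.isIn "pointcloud" p || PySem.Str.startswith p "points") then 5
  else 6

theorem pvMinQ_le (Q : List String) : pvMinQ Q ≤ 6 := by
  unfold pvMinQ; split_ifs <;> omega

-- boolean skeleton of the cons step for pvMinQ
theorem pvMinQ_cons_bools (i l c o aI aO aL aC : Bool) :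
    (if (i || aI) = true then 0
     else if (o || aO) = true then 3
     else if (l || aL) = true then 4
     else if (c || aC) = true then 5 else (6 : Nat))
    = min
        (if i = true then 0
         else if false = true then
           (if l = true then 1 else if c = true then 2 else if o = true then 3 else 6)
         else
           (if o = true then 3 else if l = true then 4 else if c = true then 5 else 6))
        (if aI = true then 0
         else if aO = true then 3
         else if aL = true then 4
         else if aC = true then 5 else 6) := by
  cases i <;> cases l <;> cases c <;> cases o <;> cases aI <;> cases aO <;> cases aL <;> cases aC <;> decide

theorem pvMinQ_cons (x : String) (xs : List String) :
    pvMinQ (x :: xs) = min (pvRankB x false) (pvMinQ xs) := by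
  rw [pvRankB_eq]
  unfold pvMinQ
  simp only [List.any_cons]
  exact pvMinQ_cons_bools _ _ _ _ _ _ _ _

theorem pvFoldQ (Q : List String) (a : Nat) (h : a ≤ 6) :
    Q.foldl (fun acc p => min acc (pvRankB p false)) a = min a (pvMinQ Q) := by
  induction Q generalizing a with
  | nil => unfold pvMinQ; simp; omega
  | cons x xs ih =>
      rw [List.foldl_cons, ih (min a (pvRankB x false)) (le_trans (Nat.min_le_left _ _) h),
          pvMinQ_cons, Nat.min_assoc]

-- the flat priority chain equals table lookup at the minimum rank (256 boolean cases)
theorem pvCombine (il ll cl ol aI aO aL aC : Bool) :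
    (if (aI || il) = true then some "IMU"
     else if ll = true then some "Laser Scan"
     else if cl = true then some "Point Cloud"
     else if (aO || ol) = true then some "Occupancy Grid Map"
     else if (aL || ll) = true then some "Laser Scan"
     else if (aC || cl) = true then some "Point Cloud"
     else (none : Option String))
    = (let best := min
          (if aI = true then 0
           else if aO = true then 3
           else if aL = true then 4
           else if aC = true then 5 else (6 : Nat))
          (if il = true then 0
           else if ll = true then 1
           else if cl = true then 2
           else if ol = true then 3 else 6)
       if best < 6 then some (pvCatsB.getD best "") else none) := by
  cases il <;> cases ll <;> cases cl <;> cases ol <;>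
  cases aI <;> cases aO <;> cases aL <;> cases aC <;> decide

-- ===== VERDICT (by name: the statement is the Claim_ definition above) =====
theorem topic_to_sensor_data_category_spec : Claim_equal_topic_to_sensor_data_category := by
  intro topic _
  unfold Spec_topic_to_sensor_data_category topic_to_sensor_data_category topic_to_sensor_data_category_alt
  by_cases h0 : PySem.Str.stripChars topic "/" = ""
  · simp [h0]
  · simp only [if_neg h0]
    rcases List.eq_nil_or_concat ((((PySem.Str.split? (PySem.Str.stripChars topic "/") "/").getD []).filter (fun p => p ≠ "")).map PySem.Str.lower) with hnil | ⟨Q, l, hcat⟩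
    · rw [hnil]; decide
    · rw [hcat]
      simp only [List.concat_eq_append, List.dropLast_concat, List.getLastD_concat,
        List.foldl_append, List.foldl_cons, List.foldl_nil, List.foldl_map, List.any_append,
        List.any_cons, List.any_nil, Bool.or_false, ← List.any_beq']
      rw [pvFoldQ Q 6 (le_refl 6), Nat.min_eq_right (pvMinQ_le Q), pvRankB_eq]
      have hne : Q ++ [l] ≠ [] := by simp
      rw [if_neg hne]
      unfold pvMinQ
      exact pvCombine _ _ _ _ _ _ _ _
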